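-- pv_equiv track=rewrite | github.com/slipperysquid/WhouseBot | helper.py | make_readable_list
-- ===== SOURCE A (Python) =====
-- def make_readable_list(message):
--     words = []
--     word = ""
--     for i in range(0, len(message)):
--         if ((ord(message[i]) >= 97 and ord(message[i]) <= 122)):
--             word += message[i]
--             if(i == len(message) - 1):
--                 words.append(word)
--         else:
--             words.append(word)
--             word = ""
--
--     return words
-- ===== SOURCE B (Python) =====
-- def make_readable_list(message):
--     parts = []
--     start = 0
--     for i, c in enumerate(message):
--         if not ('a' <= c <= 'z'):
--             parts.append(message[start:i])
--             start = i + 1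
--     if start < len(message):
--         parts.append(message[start:])
--     return parts
-- ===== Notes on version B (the rewrite author's own statement) =====
-- stated objective: simpler
-- what changed: A accumulates the current word character by character (word += c) with an in-loop last-index check; B instead records only the start index of the current segment and appends slices message[start:i] at each separator, adding the tail slice once after the loop.
import Mathlib
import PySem

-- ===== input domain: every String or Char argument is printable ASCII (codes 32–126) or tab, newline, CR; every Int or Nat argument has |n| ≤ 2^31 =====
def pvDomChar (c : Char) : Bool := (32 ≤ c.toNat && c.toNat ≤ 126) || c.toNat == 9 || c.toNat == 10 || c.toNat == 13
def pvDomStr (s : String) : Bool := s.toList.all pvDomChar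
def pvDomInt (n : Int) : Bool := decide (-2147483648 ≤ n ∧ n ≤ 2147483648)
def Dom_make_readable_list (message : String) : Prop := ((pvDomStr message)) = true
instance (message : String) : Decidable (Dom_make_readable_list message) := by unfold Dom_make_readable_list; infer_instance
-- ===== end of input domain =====

-- B replaces A's per-character run accumulator (with its in-loop last-index check) by
-- boundary indices and slices, appending the final run after the loop: same values, different shape.

-- ===== PORT A =====
-- A: index loop over range(len(message)); state = (words, word); lowercase chars are pushed
-- onto word (which is appended to words when i is the last index); any other char flushes word.
def pvAStep (cs : List Char) (n : Nat) (st : List String × List Char) (i : Nat) :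
    List String × List Char :=
  if 97 ≤ (cs.getD i ' ').toNat ∧ (cs.getD i ' ').toNat ≤ 122 then
    -- word += message[i]; if i == len(message) - 1: words.append(word)
    if i = n - 1 then (st.1 ++ [String.ofList (st.2 ++ [cs.getD i ' '])], st.2 ++ [cs.getD i ' '])
    else (st.1, st.2 ++ [cs.getD i ' '])
  else (st.1 ++ [String.ofList st.2], [])

def make_readable_list (message : String) : List String :=
  ((List.range message.toList.length).foldl
    (pvAStep message.toList message.toList.length) ([], [])).1

-- ===== PORT B =====
-- B: enumerate the characters; a non-lowercase char at index i appends the slice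
-- message[start:i] and sets start = i+1.
def pvBStep (cs : List Char) (st : List String × Int) (ic : Int × Char) :
    List String × Int :=
  if 'a' ≤ ic.2 ∧ ic.2 ≤ 'z' then st
  else (st.1 ++ [String.ofList (PySem.List.slice cs (some st.2) (some ic.1))], ic.1 + 1)

-- after the loop: if start < len(message): parts.append(message[start:])
def pvBPost (cs : List Char) (r : List String × Int) : List String :=
  if r.2 < (cs.length : Int) then r.1 ++ [String.ofList (PySem.List.slice cs (some r.2) none)]
  else r.1

def make_readable_list_alt (message : String) : List String :=
  pvBPost message.toList
    ((PySem.List.enumerate message.toList).foldl (pvBStep message.toList) ([], 0))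

-- ===== PRECONDITION & SPEC =====
def Spec_make_readable_list (message : String) (out : List String) : Prop := out = make_readable_list_alt message
instance (message : String) (out : List String) : Decidable (Spec_make_readable_list message out) := by unfold Spec_make_readable_list; infer_instance

-- ===== CLAIM (what is proved, stated in full; the proofs are below) =====
def Claim_equal_make_readable_list : Prop := ∀ (message : String), Dom_make_readable_list message → Spec_make_readable_list message (make_readable_list message)

-- ===== LEMMAS AND PROOFS =====

-- c is a lowercase ASCII letter (the condition both programs branch on)
def pvIsLower (c : Char) : Bool := 'a' ≤ c && c ≤ 'z'

-- common specification: the segments of the string between non-lowercase characters,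
-- with the final segment kept only when the string ends in a lowercase letter
def pvRuns : List Char → List (List Char)
  | [] => []
  | c :: rest =>
    if pvIsLower c then
      match pvRuns rest with
      | [] => [[c]]
      | r :: rs => (c :: r) :: rs
    else [] :: pvRuns rest

-- A's loop body without the last-index special case
def pvG (st : List String × List Char) (c : Char) : List String × List Char :=
  if 97 ≤ c.toNat ∧ c.toNat ≤ 122 then (st.1, st.2 ++ [c])
  else (st.1 ++ [String.ofList st.2], [])

-- whether the last character is a lowercase letter
def pvLastLower : List Char → Bool
  | [] => false
  | [c] => pvIsLower c
  | _ :: c :: rest => pvLastLower (c :: rest)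

-- prepend a pending run onto the head segment
def pvCat (w : List Char) : List (List Char) → List String
  | [] => []
  | r :: rs => String.ofList (w ++ r) :: rs.map String.ofList

lemma pvIsLower_iff_ord (c : Char) : (97 ≤ c.toNat ∧ c.toNat ≤ 122) ↔ pvIsLower c = true := by
  simp only [pvIsLower, Bool.and_eq_true, decide_eq_true_eq, Char.le_def, UInt32.le_iff_toNat_le,
    Char.toNat_val]
  constructor <;> (rintro ⟨h1, h2⟩; exact ⟨h1, h2⟩)

lemma pvIsLower_iff_le (c : Char) : ('a' ≤ c ∧ c ≤ 'z') ↔ pvIsLower c = true := by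
  simp [pvIsLower]

lemma pvLastLower_concat (ds : List Char) (c : Char) :
    pvLastLower (ds ++ [c]) = pvIsLower c := by
  induction ds with
  | nil => rfl
  | cons d ds ih => cases ds with
    | nil => simp [pvLastLower]
    | cons e es => simpa [pvLastLower] using ih

lemma pvRuns_ne_nil (cs : List Char) (h : cs ≠ []) : pvRuns cs ≠ [] := by
  cases cs with
  | nil => exact absurd rfl h
  | cons c rest =>
    rw [pvRuns]
    split
    · cases pvRuns rest <;> simp
    · simp

lemma pvRuns_all_lower (pend : List Char) (h : ∀ c ∈ pend, pvIsLower c = true)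
    (hne : pend ≠ []) : pvRuns pend = [pend] := by
  induction pend with
  | nil => exact absurd rfl hne
  | cons c p ih =>
    have hc := h c (by simp)
    cases hp : p with
    | nil => simp [pvRuns, hc]
    | cons e es =>
      rw [pvRuns, hc]
      simp only [if_true]
      rw [← hp, ih (fun x hx => h x (by simp [hx])) (by simp [hp])]

lemma pvRuns_sep (pend : List Char) (c : Char) (rest : List Char)
    (h : ∀ x ∈ pend, pvIsLower x = true) (hc : pvIsLower c = false) :
    pvRuns (pend ++ c :: rest) = pend :: pvRuns rest := by
  induction pend with
  | nil => simp [pvRuns, hc]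
  | cons d p ih =>
    have hd := h d (by simp)
    rw [List.cons_append, pvRuns, hd]
    simp only [if_true]
    rw [ih (fun x hx => h x (by simp [hx]))]

lemma pvCat_nil (rs : List (List Char)) : pvCat [] rs = rs.map String.ofList := by
  cases rs <;> simp [pvCat]

-- A's range-indexed fold agrees with the character fold pvG on every strict prefix
lemma pvA_prefix (full : List Char) (k : Nat) (hk : k ≤ full.length - 1) (st : List String × List Char) :
    (List.range k).foldl (pvAStep full full.length) st = (full.take k).foldl pvG st := by
  induction k generalizing st with
  | zero => simp
  | succ k ih =>
    have hk' : k ≤ full.length - 1 := by omega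
    have hklt : k < full.length := by omega
    rw [List.range_succ, List.foldl_append, ih hk']
    rw [List.take_add_one, List.foldl_append]
    have h1 : full[k]?.toList = [full[k]] := by simp [List.getElem?_eq_getElem hklt]
    rw [h1]
    simp only [List.foldl_cons, List.foldl_nil]
    unfold pvAStep pvG
    have hgetD : full.getD k ' ' = full[k] := by simp [List.getD, List.getElem?_eq_getElem hklt]
    rw [hgetD]
    have hne : ¬ (k = full.length - 1) := by omega
    rw [if_neg hne]

-- character fold + final-letter flush, with generalized accumulator
lemma pvG_runs (cs : List Char) (ws : List String) (w : List Char) :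
    (if pvLastLower cs then
      ((cs.foldl pvG (ws, w)).1 ++ [String.ofList (cs.foldl pvG (ws, w)).2])
    else (cs.foldl pvG (ws, w)).1) = ws ++ pvCat w (pvRuns cs) := by
  induction cs generalizing ws w with
  | nil => simp [pvLastLower, pvCat, pvRuns]
  | cons c rest ih =>
    rw [List.foldl_cons]
    by_cases hc : pvIsLower c = true
    · rw [show pvG (ws, w) c = (ws, w ++ [c]) by
        rw [pvG, if_pos ((pvIsLower_iff_ord c).mpr hc)]]
      cases hr : rest with
      | nil =>
        subst hr
        simp [pvLastLower, pvRuns, hc, pvCat]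
      | cons e es =>
        have hll : pvLastLower (c :: rest) = pvLastLower rest := by rw [hr]; rfl
        rw [← hr, hll, ih (w := w ++ [c])]
        obtain ⟨r, rs, hrr⟩ : ∃ r rs, pvRuns rest = r :: rs := by
          rcases h : pvRuns rest with _ | ⟨r, rs⟩
          · exact absurd h (pvRuns_ne_nil rest (by simp [hr]))
          · exact ⟨r, rs, rfl⟩
        rw [show pvRuns (c :: rest) = (c :: r) :: rs by rw [pvRuns, if_pos hc, hrr]]
        rw [hrr]
        simp [pvCat]
    · rw [show pvG (ws, w) c = (ws ++ [String.ofList w], []) by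
        rw [pvG, if_neg (fun h => hc ((pvIsLower_iff_ord c).mp h))]]
      cases hr : rest with
      | nil =>
        subst hr
        simp [pvLastLower, pvRuns, hc, pvCat]
      | cons e es =>
        have hll : pvLastLower (c :: rest) = pvLastLower rest := by rw [hr]; rfl
        rw [← hr, hll, ih (w := [])]
        obtain ⟨r, rs, hrr⟩ : ∃ r rs, pvRuns rest = r :: rs := by
          rcases h : pvRuns rest with _ | ⟨r, rs⟩
          · exact absurd h (pvRuns_ne_nil rest (by simp [hr]))
          · exact ⟨r, rs, rfl⟩
        rw [show pvRuns (c :: rest) = [] :: pvRuns rest by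
          rw [pvRuns]; simp [hc]]
        rw [hrr]
        simp [pvCat]

lemma pvA_eq_list (cs : List Char) :
    ((List.range cs.length).foldl (pvAStep cs cs.length) ([], [])).1
      = (pvRuns cs).map String.ofList := by
  rcases List.eq_nil_or_concat cs with hnil | ⟨ds, c, hcat⟩
  · subst hnil; simp [pvRuns]
  · subst hcat
    simp only [List.concat_eq_append]
    rw [show List.range (ds ++ [c]).length = List.range ds.length ++ [ds.length] by
      simp [List.range_succ]]
    rw [List.foldl_append, pvA_prefix (ds ++ [c]) ds.length (by simp) ([], [])]
    rw [List.take_left]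
    simp only [List.foldl_cons, List.foldl_nil]
    have hget : (ds ++ [c]).getD ds.length ' ' = c := by
      simp [List.getD]
    have hlast : ds.length = (ds ++ [c]).length - 1 := by simp
    have hG := pvG_runs (ds ++ [c]) [] []
    rw [List.foldl_append, List.foldl_cons, List.foldl_nil, pvLastLower_concat] at hG
    rw [pvCat_nil] at hG
    set r := ds.foldl pvG ([], []) with hr
    unfold pvAStep
    rw [hget, if_pos (by omega : ds.length = (ds ++ [c]).length - 1)]
    by_cases hc : pvIsLower c = true
    · rw [if_pos ((pvIsLower_iff_ord c).mpr hc)]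
      rw [show pvG r c = (r.1, r.2 ++ [c]) by
        rw [pvG, if_pos ((pvIsLower_iff_ord c).mpr hc)], hc, if_pos rfl] at hG
      simpa using hG
    · rw [if_neg (fun hh => hc ((pvIsLower_iff_ord c).mp hh))]
      rw [show pvG r c = (r.1 ++ [String.ofList r.2], []) by
        rw [pvG, if_neg (fun hh => hc ((pvIsLower_iff_ord c).mp hh))]] at hG
      rw [Bool.not_eq_true] at hc
      rw [hc] at hG
      simpa using hG

lemma pvA_eq (message : String) :
    make_readable_list message = (pvRuns message.toList).map String.ofList :=
  pvA_eq_list message.toList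

-- B's enumerate fold with generalized prefix/pending-run/accumulator
lemma pvB_loop (tail : List Char) (pre pend : List Char) (parts : List String)
    (h : ∀ c ∈ pend, pvIsLower c = true) :
    pvBPost (pre ++ pend ++ tail)
      ((PySem.List.enumerate tail ((pre.length + pend.length : Nat) : Int)).foldl
        (pvBStep (pre ++ pend ++ tail)) (parts, (pre.length : Int)))
    = parts ++ (pvRuns (pend ++ tail)).map String.ofList := by
  induction tail generalizing pre pend parts with
  | nil =>
    rw [PySem.List.enumerate_nil, List.foldl_nil]
    simp only [List.append_nil]
    unfold pvBPost
    cases hp : pend with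
    | nil =>
      subst hp
      simp [pvRuns]
    | cons d p =>
      subst hp
      rw [if_pos (by simp)]
      rw [PySem.List.slice_from_natCast, List.drop_left]
      rw [pvRuns_all_lower (d :: p) h (by simp)]
      simp
  | cons c rest ih =>
    rw [PySem.List.enumerate_cons, List.foldl_cons]
    by_cases hc : pvIsLower c = true
    · rw [show pvBStep (pre ++ pend ++ c :: rest) (parts, (pre.length : Int))
            ((↑(pre.length + pend.length) : Int), c) = (parts, (pre.length : Int)) by
        rw [pvBStep, if_pos ((pvIsLower_iff_le c).mpr hc)]]
      have hfull : pre ++ pend ++ c :: rest = pre ++ (pend ++ [c]) ++ rest := by simp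
      have hstart : ((pre.length + pend.length : Nat) : Int) + 1
          = ((pre.length + (pend ++ [c]).length : Nat) : Int) := by push_cast; simp; ring
      rw [hfull, hstart]
      rw [ih pre (pend ++ [c]) parts (by
        intro x hx
        rcases List.mem_append.mp hx with hx | hx
        · exact h x hx
        · simpa using (by simpa using hx) ▸ hc)]
      simp
    · rw [show pvBStep (pre ++ pend ++ c :: rest) (parts, (pre.length : Int))
            ((↑(pre.length + pend.length) : Int), c)
          = (parts ++ [String.ofList (PySem.List.slice (pre ++ pend ++ c :: rest)
              (some (pre.length : Int)) (some ((pre.length + pend.length : Nat) : Int)))],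
             ((pre.length + pend.length : Nat) : Int) + 1) by
        rw [pvBStep, if_neg (fun hh => hc ((pvIsLower_iff_le c).mp hh))]]
      have hslice : PySem.List.slice (pre ++ pend ++ c :: rest)
          (some (pre.length : Int)) (some ((pre.length + pend.length : Nat) : Int)) = pend := by
        rw [PySem.List.slice_natCast]
        rw [List.append_assoc, List.drop_left]
        simp
      rw [hslice]
      have hfull : pre ++ pend ++ c :: rest = (pre ++ pend ++ [c]) ++ rest := by simp
      have H := ih (pre ++ pend ++ [c]) [] (parts ++ [String.ofList pend]) (by simp)
      simp only [List.length_nil, Nat.add_zero, List.append_nil] at H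
      have hstart : ((pre.length + pend.length : Nat) : Int) + 1
          = (((pre ++ pend ++ [c]).length : Nat) : Int) := by
        push_cast [List.length_append]
        simp
        try ring
      rw [hfull, hstart, H]
      rw [pvRuns_sep pend c rest h (by simpa using hc)]
      simp

lemma pvB_eq (message : String) :
    make_readable_list_alt message = (pvRuns message.toList).map String.ofList := by
  have h := pvB_loop message.toList [] [] [] (by simp)
  simp only [make_readable_list_alt]
  simpa using h

-- ===== VERDICT (by name: the statement is the Claim_ definition above) =====
theorem make_readable_list_spec : Claim_equal_make_readable_list := by
  intro message _
  unfold Spec_make_readable_list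
  rw [pvA_eq, pvB_eq]
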